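-- pv_equiv track=rewrite | github.com/sp863/algorithm_python | programmers/lvl_1/55_명예의전당1/55_명예의전당1*.py | solution
-- ===== SOURCE A (Python) =====
-- def solution(k, scores):
--     answer = []
--     top = []
--
--     for score in scores:
--         top.append(score)
--         top = sorted(top, reverse=True)[:k]
--
--         answer.append(min(top))
--
--     return answer
-- ===== SOURCE B (Python) =====
-- def solution(k, scores):
--     answer = []
--     top = []  # the current top-(at most k) scores, kept in ascending order
--     for score in scores:
--         if len(top) >= k:
--             if score <= top[0]:
--                 # score does not enter the top k: minimum unchanged
--                 answer.append(top[0])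
--                 continue
--             top.pop(0)  # evict the current minimum of the top k
--         # binary search for the insertion position (after any equal elements)
--         lo, hi = 0, len(top)
--         while lo < hi:
--             mid = (lo + hi) // 2
--             if top[mid] <= score:
--                 lo = mid + 1
--             else:
--                 hi = mid
--         top.insert(lo, score)
--         answer.append(top[0])
--     return answer
-- ===== Notes on version B (the rewrite author's own statement) =====
-- stated objective: faster
-- what changed: Instead of re-sorting and slicing the whole retained list on every score, B keeps the top-k in an ascending list and per score either skips in O(1) (when the score does not beat the current k-th largest) or evicts the minimum and inserts the score at a binary-searched position.
import Mathlib
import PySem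

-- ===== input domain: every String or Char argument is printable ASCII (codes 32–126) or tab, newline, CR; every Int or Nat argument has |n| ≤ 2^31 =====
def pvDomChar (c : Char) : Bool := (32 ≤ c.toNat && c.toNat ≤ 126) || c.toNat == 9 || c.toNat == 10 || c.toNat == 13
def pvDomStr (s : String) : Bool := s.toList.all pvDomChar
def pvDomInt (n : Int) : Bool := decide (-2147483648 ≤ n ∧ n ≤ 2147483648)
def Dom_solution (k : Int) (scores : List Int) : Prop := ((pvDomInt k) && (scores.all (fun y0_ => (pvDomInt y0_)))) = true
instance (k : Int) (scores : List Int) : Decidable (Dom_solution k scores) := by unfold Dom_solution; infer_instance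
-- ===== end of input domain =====

-- B replaces A's per-score full sort+slice+min with an ascending top-k list maintained by an
-- O(1) skip or an eviction plus one binary-searched insertion per score (objective: faster).

-- ===== PORT A =====
-- A: per score, top.append(score); top = sorted(top, reverse=True)[:k]; answer.append(min(top)).
-- min([]) raises ValueError (only when k ≤ 0 and scores ≠ []); the 'none => 0' branch is
-- unreachable under Pre_solution.
def solution (k : Int) (scores : List Int) : List Int :=
  (scores.foldl
    (fun (st : List Int × List Int) score =>
      let top := PySem.List.slice (PySem.List.sorted (st.2 ++ [score]) (fun x => x) true) none (some k)
      (st.1 ++ [match PySem.List.min? top (fun x => x) with | some m => m | none => 0], top))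
    ([], [])).1

-- ===== PORT B =====
-- B's while loop 'lo, hi = 0, len(top); while lo < hi: …': binary search for the insertion
-- position.  top[mid] is always in range there (lo < hi ≤ len top), so the getD default 0 is
-- never read.
def bsr (top : List Int) (x : Int) (lo hi : Nat) : Nat :=
  if h : lo < hi then
    let mid := (lo + hi) / 2
    if top.getD mid 0 ≤ x then bsr top x (mid + 1) hi else bsr top x lo mid
  else lo
termination_by hi - lo
decreasing_by all_goals omega

-- B: skip when the top-k is full and score ≤ its minimum; otherwise evict the minimum (when
-- full) and insert score at the binary-searched position; answer.append(top[0]).  top[0]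
-- raises IndexError when top is empty (only when k ≤ 0 and scores ≠ []): the '[] => … 0'
-- fallbacks are unreachable under Pre_solution (an insert result is never []).
def solution_alt (k : Int) (scores : List Int) : List Int :=
  (scores.foldl
    (fun (st : List Int × List Int) score =>
      let top := st.2
      if k ≤ (top.length : Int) then
        match top with
        | [] => (st.1 ++ [0], top)
        | t0 :: rest =>
          if score ≤ t0 then (st.1 ++ [t0], top)
          else
            let top' := PySem.List.insert rest ((bsr rest score 0 rest.length : Nat) : Int) score
            (st.1 ++ [match top' with | [] => 0 | m :: _ => m], top')
      else
        let top' := PySem.List.insert top ((bsr top score 0 top.length : Nat) : Int) score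
        (st.1 ++ [match top' with | [] => 0 | m :: _ => m], top'))
    ([], [])).1

-- ===== PRECONDITION & SPEC =====
-- Pre_ excludes k ≤ 0 with nonempty scores: there A raises ValueError (min of an empty list)
-- on the first iteration, and B raises IndexError (top[0] of an empty list).
def Pre_solution (k : Int) (scores : List Int) : Prop := 1 ≤ k ∨ scores = []
instance (k : Int) (scores : List Int) : Decidable (Pre_solution k scores) := by unfold Pre_solution; infer_instance
def pvWitness_solution : Int × List Int := (2, [10, 40, 20])
def Spec_solution (k : Int) (scores : List Int) (out : List Int) : Prop := out = solution_alt k scores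
instance (k : Int) (scores : List Int) (out : List Int) : Decidable (Spec_solution k scores out) := by unfold Spec_solution; infer_instance

-- ===== CLAIM (what is proved, stated in full; the proofs are below) =====
def Claim_equal_solution : Prop := ∀ (k : Int) (scores : List Int), Dom_solution k scores → Pre_solution k scores → Spec_solution k scores (solution k scores)

-- ===== LEMMAS AND PROOFS =====

-- proof-side reference: ordered insertion after any equal elements
def insAsc (x : Int) : List Int → List Int
  | [] => [x]
  | y :: ys => if y ≤ x then y :: insAsc x ys else x :: y :: ys

theorem insAsc_perm (x : Int) (l : List Int) : (insAsc x l).Perm (x :: l) := by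
  induction l with
  | nil => simp [insAsc]
  | cons y ys ih =>
    simp only [insAsc]
    split
    · exact ((ih.cons y).trans (List.Perm.swap x y ys))
    · exact List.Perm.refl _

theorem insAsc_length (x : Int) (l : List Int) : (insAsc x l).length = l.length + 1 :=
  (insAsc_perm x l).length_eq

theorem insAsc_ne_nil (x : Int) (l : List Int) : insAsc x l ≠ [] := by
  intro h
  have := insAsc_length x l
  simp [h] at this

theorem insAsc_pairwise (x : Int) (l : List Int) (h : l.Pairwise (· ≤ ·)) :
    (insAsc x l).Pairwise (· ≤ ·) := by
  induction l with
  | nil => simp [insAsc]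
  | cons y ys ih =>
    rw [List.pairwise_cons] at h
    simp only [insAsc]
    split
    · rename_i hyx
      refine List.pairwise_cons.mpr ⟨?_, ih h.2⟩
      intro a ha
      rcases List.mem_cons.mp ((insAsc_perm x ys).mem_iff.mp ha) with h' | ha
      · exact h' ▸ hyx
      · exact h.1 a ha
    · rename_i hyx
      refine List.pairwise_cons.mpr ⟨?_, List.pairwise_cons.mpr h⟩
      intro a ha
      have hxy : x ≤ y := le_of_lt (lt_of_not_ge hyx)
      rcases List.mem_cons.mp ha with h' | ha
      · exact h' ▸ hxy
      · exact le_trans hxy (h.1 a ha)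

-- two sorted (≤) Int lists that are permutations of each other are equal
theorem sorted_unique {l₁ l₂ : List Int} (hp : l₁.Perm l₂)
    (h₁ : l₁.Pairwise (· ≤ ·)) (h₂ : l₂.Pairwise (· ≤ ·)) : l₁ = l₂ :=
  PySem.List.eq_of_perm_of_pairwise_le_of_injective (fun x => x) (fun _ _ h => h) hp h₁ h₂

-- in a sorted list, reads are monotone in the index
theorem pw_getD_mono (l : List Int) (hpw : l.Pairwise (· ≤ ·)) (i j : Nat)
    (hij : i ≤ j) (hj : j < l.length) : l.getD i 0 ≤ l.getD j 0 := by
  rcases Nat.eq_or_lt_of_le hij with rfl | h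
  · exact le_refl _
  · rw [List.getD_eq_getElem l 0 (lt_trans h hj), List.getD_eq_getElem l 0 hj]
    exact List.pairwise_iff_getElem.mp hpw i j (lt_trans h hj) hj h

-- the binary search finds the boundary between elements ≤ x and elements > x
theorem bsr_spec (l : List Int) (x : Int) (hpw : l.Pairwise (· ≤ ·)) :
    ∀ (n lo hi : Nat), hi - lo ≤ n → lo ≤ hi → hi ≤ l.length →
    (∀ i, i < lo → l.getD i 0 ≤ x) →
    (∀ i, hi ≤ i → i < l.length → x < l.getD i 0) →
    lo ≤ bsr l x lo hi ∧ bsr l x lo hi ≤ hi ∧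
    (∀ i, i < bsr l x lo hi → l.getD i 0 ≤ x) ∧
    (∀ i, bsr l x lo hi ≤ i → i < l.length → x < l.getD i 0) := by
  intro n
  induction n with
  | zero =>
    intro lo hi hfuel hlohi hhil h1 h2
    have : lo = hi := by omega
    subst this
    rw [bsr]
    simp only [dif_neg (lt_irrefl lo)]
    exact ⟨le_refl _, le_refl _, h1, h2⟩
  | succ n ih =>
    intro lo hi hfuel hlohi hhil h1 h2
    rw [bsr]
    by_cases hlt : lo < hi
    · rw [dif_pos hlt]
      simp only []
      by_cases hmid : l.getD ((lo + hi) / 2) 0 ≤ x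
      · rw [if_pos hmid]
        have hrec := ih ((lo + hi) / 2 + 1) hi (by omega) (by omega) hhil
          (fun i hi' => le_trans (pw_getD_mono l hpw i ((lo + hi) / 2) (by omega) (by omega)) hmid)
          h2
        exact ⟨le_trans (by omega) hrec.1, hrec.2.1, hrec.2.2.1, hrec.2.2.2⟩
      · rw [if_neg hmid]
        have hx : x < l.getD ((lo + hi) / 2) 0 := lt_of_not_ge hmid
        have hrec := ih lo ((lo + hi) / 2) (by omega) (by omega) (by omega) h1
          (fun i hi' hil => lt_of_lt_of_le hx (pw_getD_mono l hpw ((lo + hi) / 2) i hi' hil))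
        exact ⟨hrec.1, le_trans hrec.2.1 (by omega), hrec.2.2.1, hrec.2.2.2⟩
    · rw [dif_neg hlt]
      have : lo = hi := by omega
      exact ⟨le_refl _, by omega, h1, fun i hli hil => h2 i (by omega) hil⟩

-- inserting at the boundary position of a sorted list is exactly ordered insertion
theorem insert_pos_eq_insAsc (l : List Int) (x : Int) (hpw : l.Pairwise (· ≤ ·)) (r : Nat)
    (hr : r ≤ l.length)
    (h1 : ∀ i, i < r → l.getD i 0 ≤ x)
    (h2 : ∀ i, r ≤ i → i < l.length → x < l.getD i 0) :
    l.take r ++ x :: l.drop r = insAsc x l := by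
  apply sorted_unique
  · exact (List.perm_middle).trans (by rw [List.take_append_drop]; exact (insAsc_perm x l).symm)
  · have htake : ∀ a ∈ l.take r, a ≤ x := by
      intro a ha
      obtain ⟨i, hi, hget⟩ := List.mem_iff_getElem.mp ha
      have hir : i < r := lt_of_lt_of_le hi (by simp)
      have hil : i < l.length := by
        have := l.length_take (i := r); omega
      rw [List.getElem_take] at hget
      have := h1 i hir
      rw [List.getD_eq_getElem l 0 hil, hget] at this
      exact this
    have hdrop : ∀ b ∈ l.drop r, x ≤ b := by
      intro b hb
      obtain ⟨j, hj, hget⟩ := List.mem_iff_getElem.mp hb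
      rw [List.getElem_drop] at hget
      have hjl : r + j < l.length := by
        have := l.length_drop (i := r); omega
      have := h2 (r + j) (by omega) hjl
      rw [List.getD_eq_getElem l 0 hjl, hget] at this
      exact le_of_lt this
    refine List.pairwise_append.mpr ⟨hpw.sublist (List.take_sublist r l), ?_, ?_⟩
    · refine List.pairwise_cons.mpr ⟨hdrop, hpw.sublist (List.drop_sublist r l)⟩
    · intro a ha b hb
      rcases List.mem_cons.mp hb with rfl | hb
      · exact htake a ha
      · exact le_trans (htake a ha) (hdrop b hb)
  · exact insAsc_pairwise x l hpw

-- B's binary-searched insert computes the ordered insertion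
theorem insert_bsr (l : List Int) (x : Int) (hpw : l.Pairwise (· ≤ ·)) :
    PySem.List.insert l ((bsr l x 0 l.length : Nat) : Int) x = insAsc x l := by
  obtain ⟨_, hle, h1, h2⟩ :=
    bsr_spec l x hpw l.length 0 l.length (by omega) (by omega) (le_refl _)
      (by omega) (by omega)
  rw [PySem.List.insert_natCast l _ x hle]
  exact insert_pos_eq_insAsc l x hpw _ hle h1 h2

-- A's sort of (current descending top ++ [x]) is the reverse of B's ordered insertion
theorem sorted_append_eq (x : Int) (tB : List Int) (h : tB.Pairwise (· ≤ ·)) :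
    PySem.List.sorted (tB.reverse ++ [x]) (fun y => y) true = (insAsc x tB).reverse := by
  have h1 : (PySem.List.sorted (tB.reverse ++ [x]) (fun y => y) true).reverse.Pairwise (· ≤ ·) := by
    rw [List.pairwise_reverse]
    exact (PySem.List.sorted_pairwise_rev (tB.reverse ++ [x]) (fun y => y)).imp (fun h => h)
  have hperm : (PySem.List.sorted (tB.reverse ++ [x]) (fun y => y) true).reverse.Perm (insAsc x tB) := by
    refine ((List.reverse_perm _).trans ((PySem.List.sorted_perm _ _ _).trans ?_)).trans (insAsc_perm x tB).symm
    exact ((List.reverse_perm tB).append_right _).trans (List.perm_append_singleton x tB)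
  have heq := sorted_unique hperm h1 (insAsc_pairwise x tB h)
  rw [← List.reverse_reverse (PySem.List.sorted (tB.reverse ++ [x]) (fun y => y) true), heq]

-- evicting the head of a full sorted list then inserting = tail of inserting
theorem insAsc_tail (x t0 : Int) (rest : List Int) (h : (t0 :: rest).Pairwise (· ≤ ·)) :
    (insAsc x (t0 :: rest)).tail = (if t0 < x then insAsc x rest else t0 :: rest) := by
  rw [List.pairwise_cons] at h
  by_cases hlt : t0 < x
  · simp [insAsc, le_of_lt hlt, hlt]
  · simp only [if_neg hlt]
    by_cases hle : t0 ≤ x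
    · -- x = t0
      have hx : x = t0 := le_antisymm (le_of_not_gt hlt) hle
      simp only [insAsc, if_pos hle, List.tail_cons]
      apply sorted_unique
      · exact (insAsc_perm x rest).trans (by rw [hx])
      · exact insAsc_pairwise x rest h.2
      · exact List.pairwise_cons.mpr h
    · simp [insAsc, hle]

-- the min A reads off its descending list is the head of B's ascending list
theorem min_reverse_head (m : Int) (t : List Int) (h : (m :: t).Pairwise (· ≤ ·)) :
    PySem.List.min? (m :: t).reverse (fun y => y) = some m := by
  rw [List.pairwise_cons] at h
  obtain ⟨m', hm'⟩ : ∃ m', PySem.List.min? (m :: t).reverse (fun y => y) = some m' := by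
    cases hmin : PySem.List.min? (m :: t).reverse (fun y => y) with
    | none => exact absurd ((PySem.List.min?_eq_none_iff _ _).mp hmin) (by simp)
    | some m' => exact ⟨m', rfl⟩
  have hmem : m' ∈ m :: t := (List.mem_reverse).mp (PySem.List.min?_mem hm')
  have hle : m ≤ m' := by
    rcases List.mem_cons.mp hmem with h' | hmem
    · exact h' ▸ le_refl _
    · exact h.1 m' hmem
  have hge : m' ≤ m := PySem.List.min?_isMin hm' m (by simp)
  rw [hm', le_antisymm hge hle]

-- the loop invariant: B's top is the reverse of A's top, sorted ascending, of length ≤ k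
def LoopInv (k : Int) (tA tB : List Int) : Prop :=
  tB = tA.reverse ∧ tB.Pairwise (· ≤ ·) ∧ (tB.length : Int) ≤ k

-- one step of each loop: tops stay related, appended values agree
theorem step_eq (k x : Int) (hk : 1 ≤ k) (tA tB : List Int) (hinv : LoopInv k tA tB) :
    ∃ (tA' tB' : List Int) (v : Int), LoopInv k tA' tB' ∧
      (PySem.List.slice (PySem.List.sorted (tA ++ [x]) (fun y => y) true) none (some k) = tA') ∧
      (∀ ans : List Int,
        (if k ≤ (tB.length : Int) then
          match tB with
          | [] => (ans ++ [0], tB)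
          | t0 :: rest =>
            if x ≤ t0 then (ans ++ [t0], tB)
            else
              let top' := PySem.List.insert rest ((bsr rest x 0 rest.length : Nat) : Int) x
              (ans ++ [match top' with | [] => 0 | m :: _ => m], top')
        else
          let top' := PySem.List.insert tB ((bsr tB x 0 tB.length : Nat) : Int) x
          (ans ++ [match top' with | [] => 0 | m :: _ => m], top')) = (ans ++ [v], tB')) ∧
      (match PySem.List.min? tA' (fun y => y) with | some m => m | none => 0) = v := by
  obtain ⟨hrev, hpw, hlen⟩ := hinv
  have hA : PySem.List.sorted (tA ++ [x]) (fun y => y) true = (insAsc x tB).reverse := by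
    have := sorted_append_eq x tB hpw
    rw [hrev] at this ⊢
    simpa [List.reverse_reverse] using this
  have hslice : ∀ l : List Int, PySem.List.slice l none (some k) = l.take k.toNat :=
    fun l => PySem.List.slice_to l (by omega)
  by_cases hfull : k ≤ (tB.length : Int)
  · -- tB full: length = k.toNat ≥ 1
    have hlenk : tB.length = k.toNat := by omega
    obtain ⟨t0, rest, rfl⟩ : ∃ t0 rest, tB = t0 :: rest := by
      cases tB with
      | nil => exfalso; simp at hlenk; omega
      | cons a l => exact ⟨a, l, rfl⟩
    have hrw_rest : PySem.List.insert rest ((bsr rest x 0 rest.length : Nat) : Int) x = insAsc x rest :=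
      insert_bsr rest x (List.pairwise_cons.mp hpw).2
    set tB' : List Int := if t0 < x then insAsc x rest else t0 :: rest with htB'
    have htail : (insAsc x (t0 :: rest)).tail = tB' := insAsc_tail x t0 rest hpw
    have hlenB' : tB'.length = k.toNat := by
      rw [htB']; split
      · have := insAsc_length x rest; simp at hlenk ⊢; omega
      · exact hlenk
    have hins : ∃ a, insAsc x (t0 :: rest) = a :: tB' := by
      cases hI : insAsc x (t0 :: rest) with
      | nil => exact absurd hI (insAsc_ne_nil _ _)
      | cons a l => exact ⟨a, by rw [← htail, hI]; rfl⟩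
    have htake : (insAsc x (t0 :: rest)).reverse.take k.toNat = tB'.reverse := by
      obtain ⟨a, hins⟩ := hins
      rw [hins]
      simp only [List.reverse_cons]
      rw [List.take_append_of_le_length (by simp [hlenB'])]
      rw [List.take_of_length_le (by simp [hlenB'])]
    have hpwB' : tB'.Pairwise (· ≤ ·) := by
      rw [← htail]
      exact (insAsc_pairwise x _ hpw).tail
    have hne : tB' ≠ [] := by
      intro h; rw [h] at hlenB'; simp at hlenB'; omega
    clear_value tB'
    obtain ⟨m, t, rfl⟩ := List.exists_cons_of_ne_nil hne
    refine ⟨(m :: t).reverse, m :: t, m, ⟨by simp, hpwB', by rw [hlenB']; omega⟩, ?_, ?_, ?_⟩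
    · rw [hslice, hA, htake]
    · intro ans
      rw [if_pos hfull]
      by_cases hxt : x ≤ t0
      · rw [if_neg (not_lt.mpr hxt)] at htB'
        injection htB' with e1 e2
        subst e1; subst e2
        simp [hxt]
      · rw [if_pos (lt_of_not_ge hxt)] at htB'
        simp [hxt, hrw_rest, ← htB']
    · rw [min_reverse_head m t hpwB']
  · -- tB not full: whole inserted list kept
    have hrw_top : PySem.List.insert tB ((bsr tB x 0 tB.length : Nat) : Int) x = insAsc x tB :=
      insert_bsr tB x hpw
    have hlen' : (insAsc x tB).length ≤ k.toNat := by
      rw [insAsc_length]; omega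
    obtain ⟨m, t, hmt⟩ : ∃ m t, insAsc x tB = m :: t := by
      cases hI : insAsc x tB with
      | nil => exact absurd hI (insAsc_ne_nil _ _)
      | cons a l => exact ⟨a, l, rfl⟩
    have hpw' : (m :: t).Pairwise (· ≤ ·) := hmt ▸ insAsc_pairwise x tB hpw
    refine ⟨(m :: t).reverse, m :: t, m, ⟨by simp, hpw', by rw [← hmt, insAsc_length]; omega⟩, ?_, ?_, ?_⟩
    · rw [hslice, hA, hmt, List.take_of_length_le (by simpa [← hmt] using hlen')]
    · intro ans
      rw [if_neg hfull, hrw_top, hmt]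
    · rw [min_reverse_head m t hpw']

-- the two folds agree on the answer component whenever the tops are related
theorem loop_eq (k : Int) (hk : 1 ≤ k) (scores : List Int) :
    ∀ (ans tA tB : List Int), LoopInv k tA tB →
      (scores.foldl
        (fun (st : List Int × List Int) score =>
          let top := PySem.List.slice (PySem.List.sorted (st.2 ++ [score]) (fun x => x) true) none (some k)
          (st.1 ++ [match PySem.List.min? top (fun x => x) with | some m => m | none => 0], top))
        (ans, tA)).1 =
      (scores.foldl
        (fun (st : List Int × List Int) score =>
          let top := st.2
          if k ≤ (top.length : Int) then
            match top with
            | [] => (st.1 ++ [0], top)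
            | t0 :: rest =>
              if score ≤ t0 then (st.1 ++ [t0], top)
              else
                let top' := PySem.List.insert rest ((bsr rest score 0 rest.length : Nat) : Int) score
                (st.1 ++ [match top' with | [] => 0 | m :: _ => m], top')
          else
            let top' := PySem.List.insert top ((bsr top score 0 top.length : Nat) : Int) score
            (st.1 ++ [match top' with | [] => 0 | m :: _ => m], top'))
        (ans, tB)).1 := by
  induction scores with
  | nil => intro ans tA tB _; rfl
  | cons x xs ih =>
    intro ans tA tB hinv
    obtain ⟨tA', tB', v, hinv', hA', hB', hv⟩ := step_eq k x hk tA tB hinv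
    simp only [List.foldl_cons]
    have hstepA :
        (let top := PySem.List.slice (PySem.List.sorted (tA ++ [x]) (fun y => y) true) none (some k)
         ((ans ++ [match PySem.List.min? top (fun y => y) with | some m => m | none => 0], top) : List Int × List Int))
        = (ans ++ [v], tA') := by
      simp only []
      rw [hA', hv]
    have hstepB := hB' ans
    rw [hstepA, hstepB]
    exact ih (ans ++ [v]) tA' tB' hinv'

-- ===== VERDICT (by name: the statement is the Claim_ definition above) =====
theorem solution_spec : Claim_equal_solution := by
  intro k scores _hdom hpre
  unfold Spec_solution solution solution_alt
  rcases hpre with hk | rfl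
  · exact loop_eq k hk scores [] [] [] ⟨rfl, List.Pairwise.nil, by simp; omega⟩
  · rfl
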